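-- pv_equiv track=rewrite | github.com/quocthang0507/ThuVienPythonXuLyCoBan | ThuVien.py | Tong
-- ===== SOURCE A (Python) =====
-- from numbers import Number
--
-- def Tong(mang: []):
--     """Trả về tổng các giá trị trong mảng số
--
--     :param mang: Mảng số
--     :return: Tổng
--     """
--     tong = 0
--     for phan_tu in mang:
--         if isinstance(phan_tu, Number):
--             tong += phan_tu
--         else:
--             raise Exception('Phần tử trong mảng phải là số')
--     return tong
-- ===== SOURCE B (Python) =====
-- from numbers import Number
--
-- def Tong(mang: []):
--     """Trả về tổng các giá trị trong mảng số (divide-and-conquer).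
--
--     :param mang: Mảng số
--     :return: Tổng
--     """
--     def chia(lo, hi):
--         # sum of mang[lo:hi] by splitting the index range in half
--         if lo >= hi:
--             return 0
--         if hi - lo == 1:
--             x = mang[lo]
--             if isinstance(x, Number):
--                 return x
--             raise Exception('Phần tử trong mảng phải là số')
--         mid = (lo + hi) // 2
--         return chia(lo, mid) + chia(mid, hi)
--     return chia(0, len(mang))
-- ===== Notes on version B (the rewrite author's own statement) =====
-- stated objective: alternative
-- what changed: Replaces the single left-to-right accumulate loop with a recursive divide-and-conquer summation over index halves (validating each element at the leaves), which traverses the data as a balanced recursion tree instead of a linear fold.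
import Mathlib
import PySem

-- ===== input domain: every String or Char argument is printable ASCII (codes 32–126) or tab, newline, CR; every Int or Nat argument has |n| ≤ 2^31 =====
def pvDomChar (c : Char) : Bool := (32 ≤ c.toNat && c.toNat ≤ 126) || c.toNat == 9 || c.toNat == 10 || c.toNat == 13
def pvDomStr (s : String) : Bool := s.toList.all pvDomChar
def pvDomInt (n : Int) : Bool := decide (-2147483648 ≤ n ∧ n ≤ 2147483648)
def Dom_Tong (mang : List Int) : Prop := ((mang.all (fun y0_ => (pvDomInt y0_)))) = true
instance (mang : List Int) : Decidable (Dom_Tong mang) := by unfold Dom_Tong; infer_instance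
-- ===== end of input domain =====

-- B sums by recursive divide-and-conquer over index halves instead of A's linear accumulate loop; same values on List Int.


-- ===== PORT A =====
-- A: single loop accumulating tong (the isinstance check is always true for Int inputs).
def Tong (mang : List Int) : Int := mang.foldl (fun tong phan_tu => tong + phan_tu) 0

-- ===== PORT B =====
-- B's helper chia(lo, hi): divide-and-conquer sum of mang[lo:hi]; leaf index is in range
-- whenever hi ≤ mang.length, so getD 0 is exact for mang[lo] there.
def TongChia (mang : List Int) (lo hi : Nat) : Int :=
  if _h : lo ≥ hi then 0
  else if _h1 : hi - lo = 1 then mang.getD lo 0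
  else
    TongChia mang lo ((lo + hi) / 2) + TongChia mang ((lo + hi) / 2) hi
termination_by hi - lo
decreasing_by all_goals omega

def Tong_alt (mang : List Int) : Int := TongChia mang 0 mang.length

-- ===== PRECONDITION & SPEC =====
def Spec_Tong (mang : List Int) (out : Int) : Prop := out = Tong_alt mang
instance (mang : List Int) (out : Int) : Decidable (Spec_Tong mang out) := by unfold Spec_Tong; infer_instance

-- ===== CLAIM (what is proved, stated in full; the proofs are below) =====
def Claim_equal_Tong : Prop := ∀ (mang : List Int), Dom_Tong mang → Spec_Tong mang (Tong mang)

-- ===== LEMMAS AND PROOFS =====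
-- chia computes the sum of the segment mang[lo:hi] (when hi ≤ length)
theorem TongChia_eq_segSum (mang : List Int) :
    ∀ n lo hi, hi - lo = n → hi ≤ mang.length →
      TongChia mang lo hi = ((mang.drop lo).take (hi - lo)).sum := by
  intro n
  induction n using Nat.strong_induction_on with
  | _ n ih =>
    intro lo hi hn hle
    unfold TongChia
    split_ifs with h h1
    · simp [show hi - lo = 0 by omega]
    · have hlt : lo < mang.length := by omega
      have hdrop : mang.drop lo = mang[lo] :: mang.drop (lo + 1) :=
        List.drop_eq_getElem_cons hlt
      rw [h1, hdrop, List.take_succ_cons, List.take_zero, List.sum_cons, List.sum_nil,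
        add_zero]
      simp [List.getElem?_eq_getElem hlt]
    · set mid := (lo + hi) / 2 with hmid
      have h2 : 2 ≤ hi - lo := by omega
      have hlm : lo < mid := by omega
      have hmh : mid < hi := by omega
      rw [ih (mid - lo) (by omega) lo mid rfl (by omega),
          ih (hi - mid) (by omega) mid hi rfl hle]
      have hsplit : hi - lo = (mid - lo) + (hi - mid) := by omega
      have hd : (mang.drop lo).drop (mid - lo) = mang.drop mid := by
        rw [List.drop_drop]; congr 1; omega
      rw [hsplit, List.take_add, List.sum_append, hd]

-- the accumulating fold computes acc + sum
theorem foldl_add_sum (xs : List Int) (acc : Int) :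
    xs.foldl (fun tong phan_tu => tong + phan_tu) acc = acc + xs.sum := by
  induction xs generalizing acc with
  | nil => simp
  | cons x xs ih => simp [List.foldl, ih]; ring

-- ===== VERDICT (by name: the statement is the Claim_ definition above) =====
theorem Tong_spec : Claim_equal_Tong := by
  intro mang _
  unfold Spec_Tong Tong Tong_alt
  rw [TongChia_eq_segSum mang mang.length 0 mang.length (by omega) le_rfl]
  simpa using foldl_add_sum mang 0
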